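-- pv_equiv track=rewrite | github.com/TAVEResearch/TAVE_algorithm_study | 이상원/programmers/LV1/0514_phoneketmon.py | solution_my
-- ===== SOURCE A (Python) =====
-- import itertools
--
-- def solution_my(nums):
--     answer = 0
--     get_num = len(nums) // 2
--     list_get = list(itertools.combinations(nums, get_num))
--     for i in list_get:
--         rem_dupl = set(i)
--         if answer < len(rem_dupl):
--             answer = len(rem_dupl)
--     return answer
-- ===== SOURCE B (Python) =====
-- def solution_my(nums):
--     return min(len(set(nums)), len(nums) // 2)
-- ===== Notes on version B (the rewrite author's own statement) =====
-- stated objective: faster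
-- what changed: Replaced the enumeration of all C(n, n/2) combinations (each deduplicated into a set) by the closed form min(number of distinct values, n//2).
import Mathlib
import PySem

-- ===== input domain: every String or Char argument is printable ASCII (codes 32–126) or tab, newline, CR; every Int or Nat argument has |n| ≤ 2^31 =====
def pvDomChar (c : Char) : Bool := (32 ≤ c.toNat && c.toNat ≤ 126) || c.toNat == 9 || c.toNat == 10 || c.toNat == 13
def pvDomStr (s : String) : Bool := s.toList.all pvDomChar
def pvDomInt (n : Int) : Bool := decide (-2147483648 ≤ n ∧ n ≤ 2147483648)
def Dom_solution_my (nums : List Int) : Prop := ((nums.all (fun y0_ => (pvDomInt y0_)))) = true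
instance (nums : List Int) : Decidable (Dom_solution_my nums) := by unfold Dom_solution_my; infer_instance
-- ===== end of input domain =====

-- B replaces A's enumeration of all C(n, n/2) combinations by the closed form
-- min(#distinct values, n//2); proved to return the same value on every input.

-- ===== PORT A =====
-- itertools.combinations(l, k): all length-k subsequences, in Python's order
def pvCombinations : List Int → Nat → List (List Int)
  | _, 0 => [[]]
  | [], _ + 1 => []
  | x :: xs, k + 1 => ((pvCombinations xs k).map (fun c => x :: c)) ++ pvCombinations xs (k + 1)

def solution_my (nums : List Int) : Int :=
  let get_num := nums.length / 2
  let list_get := pvCombinations nums get_num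
  list_get.foldl (fun answer i =>
    let rem_dupl := PySem.Set.ofList i
    if answer < (rem_dupl.length : Int) then (rem_dupl.length : Int) else answer) 0

-- ===== PORT B =====
def solution_my_alt (nums : List Int) : Int :=
  ((min (PySem.Set.ofList nums).length (nums.length / 2) : Nat) : Int)

-- ===== PRECONDITION & SPEC =====
def Spec_solution_my (nums : List Int) (out : Int) : Prop := out = solution_my_alt nums
instance (nums : List Int) (out : Int) : Decidable (Spec_solution_my nums out) := by unfold Spec_solution_my; infer_instance

-- ===== CLAIM (what is proved, stated in full; the proofs are below) =====
def Claim_equal_solution_my : Prop := ∀ (nums : List Int), Dom_solution_my nums → Spec_solution_my nums (solution_my nums)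

-- ===== LEMMAS AND PROOFS =====

theorem mem_pvCombinations (l : List Int) (k : Nat) (c : List Int) :
    c ∈ pvCombinations l k ↔ c.Sublist l ∧ c.length = k := by
  induction l generalizing k c with
  | nil =>
    cases k with
    | zero =>
      simp only [pvCombinations, List.mem_singleton]
      constructor
      · rintro rfl; exact ⟨List.Sublist.refl _, rfl⟩
      · rintro ⟨h, hl⟩; exact List.eq_nil_of_length_eq_zero hl
    | succ k =>
      simp only [pvCombinations, List.not_mem_nil, false_iff]
      rintro ⟨h, hl⟩
      rw [List.sublist_nil.mp h] at hl; simp at hl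
  | cons x xs ih =>
    cases k with
    | zero =>
      simp only [pvCombinations, List.mem_singleton]
      constructor
      · rintro rfl; exact ⟨List.nil_sublist _, rfl⟩
      · rintro ⟨h, hl⟩; exact List.eq_nil_of_length_eq_zero hl
    | succ k =>
      simp only [pvCombinations, List.mem_append, List.mem_map]
      constructor
      · rintro (⟨c', hc', rfl⟩ | hc)
        · obtain ⟨hs, hl⟩ := (ih k c').mp hc'
          exact ⟨List.Sublist.cons₂ x hs, by simp [hl]⟩
        · obtain ⟨hs, hl⟩ := (ih (k + 1) c).mp hc
          exact ⟨hs.cons x, hl⟩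
      · rintro ⟨hs, hl⟩
        rcases List.sublist_cons_iff.mp hs with h | ⟨r, rfl, hr⟩
        · exact Or.inr ((ih (k + 1) c).mpr ⟨h, hl⟩)
        · exact Or.inl ⟨r, (ih k r).mpr ⟨hr, by simpa using hl⟩, rfl⟩

theorem len_discard (s : PySem.Set Int) (x : Int) (h : s.Nodup) :
    (PySem.Set.discard s x).length = if x ∈ s then s.length - 1 else s.length := by
  by_cases hx : x ∈ s
  · simp only [hx, if_true]
    have hperm : s.Perm (x :: PySem.Set.discard s x) := by
      apply (List.perm_ext_iff_of_nodup h ?_).mpr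
      · intro y
        simp only [List.mem_cons, PySem.Set.mem_discard]
        constructor
        · intro hy; by_cases hyx : y = x
          · exact Or.inl hyx
          · exact Or.inr ⟨hy, hyx⟩
        · rintro (rfl | ⟨hy, _⟩) <;> [exact hx; exact hy]
      · refine List.nodup_cons.mpr ⟨?_, PySem.Set.nodup_discard _ _ h⟩
        intro hmem
        exact ((PySem.Set.mem_discard s x x).mp hmem).2 rfl
    have := hperm.length_eq
    simp at this; omega
  · simp only [hx, if_false]
    have hperm : (PySem.Set.discard s x).Perm s := by
      apply (List.perm_ext_iff_of_nodup (PySem.Set.nodup_discard _ _ h) h).mpr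
      intro y
      simp only [PySem.Set.mem_discard]
      constructor
      · rintro ⟨hy, _⟩; exact hy
      · intro hy; exact ⟨hy, fun hyx => hx (hyx ▸ hy)⟩
    exact hperm.length_eq

theorem len_ofList_cons (x : Int) (xs : List Int) :
    (PySem.Set.ofList (x :: xs)).length =
      if x ∈ xs then (PySem.Set.ofList xs).length else (PySem.Set.ofList xs).length + 1 := by
  rw [PySem.Set.ofList_cons, List.length_cons,
    len_discard _ _ (PySem.Set.nodup_ofList xs)]
  by_cases hx : x ∈ xs
  · have hmem : x ∈ PySem.Set.ofList xs := (PySem.Set.mem_ofList xs x).mpr hx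
    have hpos : 0 < (PySem.Set.ofList xs).length := List.length_pos_of_mem hmem
    simp only [hmem, hx, if_true]; omega
  · have hmem : x ∉ PySem.Set.ofList xs := fun h => hx ((PySem.Set.mem_ofList xs x).mp h)
    simp [hmem, hx]

theorem ofList_len_mono (c l : List Int) (h : c.Sublist l) :
    (PySem.Set.ofList c).length ≤ (PySem.Set.ofList l).length := by
  apply List.Subperm.length_le
  apply (PySem.Set.nodup_ofList c).subperm
  intro y hy
  exact (PySem.Set.mem_ofList l y).mpr (h.subset ((PySem.Set.mem_ofList c y).mp hy))

theorem exists_best_comb (l : List Int) (k : Nat) (hk : k ≤ l.length) :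
    ∃ c, c.Sublist l ∧ c.length = k ∧
      (PySem.Set.ofList c).length = min (PySem.Set.ofList l).length k := by
  induction l generalizing k with
  | nil =>
    rw [List.length_nil, Nat.le_zero] at hk; subst hk
    exact ⟨[], List.Sublist.refl _, rfl, by simp [PySem.Set.ofList]⟩
  | cons x xs ih =>
    cases k with
    | zero => exact ⟨[], List.nil_sublist _, rfl, by simp [PySem.Set.ofList]⟩
    | succ k =>
      by_cases hx : x ∈ xs
      · by_cases hk' : k + 1 ≤ xs.length
        · obtain ⟨c, hs, hl, hset⟩ := ih (k + 1) hk'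
          exact ⟨c, hs.cons x, hl, by rw [len_ofList_cons, if_pos hx]; exact hset⟩
        · have hlen : (x :: xs).length = xs.length + 1 := by simp
          have hk2 : k + 1 ≤ xs.length + 1 := by rw [hlen] at hk; exact hk
          have h1 : (PySem.Set.ofList (x :: xs)).length ≤ (x :: xs).length :=
            PySem.Set.length_ofList_le _
          exact ⟨x :: xs, List.Sublist.refl _, by omega, by omega⟩
      · have hk' : k ≤ xs.length := by
          have : (x :: xs).length = xs.length + 1 := by simp
          omega
        obtain ⟨c, hs, hl, hset⟩ := ih k hk'
        have hxc : x ∉ c := fun h => hx (hs.subset h)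
        refine ⟨x :: c, hs.cons₂ x, by simp [hl], ?_⟩
        rw [len_ofList_cons, if_neg hxc, len_ofList_cons, if_neg hx, hset]
        omega

theorem loop_eq_max (f : List Int → Int) (l : List (List Int)) (a : Int) :
    l.foldl (fun ans i => if ans < f i then f i else ans) a
      = l.foldl (fun ans i => max ans (f i)) a := by
  induction l generalizing a with
  | nil => rfl
  | cons x xs ih =>
    simp only [List.foldl_cons]
    rw [ih]
    congr 1
    rcases lt_trichotomy a (f x) with h | h | h
    · simp [h, max_eq_right (le_of_lt h)]
    · simp [h, max_self]
    · simp [not_lt.mpr (le_of_lt h), max_eq_left (le_of_lt h)]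

theorem init_le_foldl_max (f : List Int → Int) (l : List (List Int)) (a : Int) :
    a ≤ l.foldl (fun ans i => max ans (f i)) a := by
  induction l generalizing a with
  | nil => exact le_refl a
  | cons x xs ih => exact le_trans (le_max_left a (f x)) (ih _)

theorem le_foldl_max (f : List Int → Int) (l : List (List Int)) (a : Int) (x : List Int)
    (hx : x ∈ l) : f x ≤ l.foldl (fun ans i => max ans (f i)) a := by
  induction l generalizing a with
  | nil => cases hx
  | cons y ys ih =>
    simp only [List.foldl_cons]
    rcases List.mem_cons.mp hx with rfl | hmem
    · exact le_trans (le_max_right a (f x)) (init_le_foldl_max f ys _)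
    · exact ih _ hmem

theorem foldl_max_le (f : List Int → Int) (l : List (List Int)) (a M : Int)
    (ha : a ≤ M) (h : ∀ x ∈ l, f x ≤ M) :
    l.foldl (fun ans i => max ans (f i)) a ≤ M := by
  induction l generalizing a with
  | nil => exact ha
  | cons x xs ih =>
    exact ih _ (max_le ha (h x (by simp))) (fun y hy => h y (List.mem_cons_of_mem x hy))

-- ===== VERDICT (by name: the statement is the Claim_ definition above) =====
theorem solution_my_spec : Claim_equal_solution_my := by
  intro nums _
  unfold Spec_solution_my solution_my_alt
  have hA : solution_my nums = (pvCombinations nums (nums.length / 2)).foldl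
      (fun answer i => if answer < ((PySem.Set.ofList i).length : Int)
        then ((PySem.Set.ofList i).length : Int) else answer) 0 := rfl
  rw [hA, loop_eq_max (fun i => ((PySem.Set.ofList i).length : Int))]
  set k := nums.length / 2 with hkdef
  have hk : k ≤ nums.length := Nat.div_le_self _ _
  obtain ⟨c, hs, hl, hset⟩ := exists_best_comb nums k hk
  apply le_antisymm
  · apply foldl_max_le
    · exact Int.natCast_nonneg _
    · intro x hx
      obtain ⟨hxs, hxl⟩ := (mem_pvCombinations nums k x).mp hx
      have h1 := ofList_len_mono x nums hxs
      have h2 := PySem.Set.length_ofList_le x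
      simp only [Nat.cast_min]
      apply le_min <;> exact_mod_cast (by omega : (PySem.Set.ofList x).length ≤ _)
  · have hc := (mem_pvCombinations nums k c).mpr ⟨hs, hl⟩
    have hle := le_foldl_max (fun i => ((PySem.Set.ofList i).length : Int))
      (pvCombinations nums k) 0 c hc
    simp only [hset] at hle
    exact_mod_cast hle
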